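-- pv_equiv track=rewrite | github.com/NFREC-Liao-Lab/MicroFisher | microfisher_package/src/microfisher/merging_algorithm.py | a_equal
-- ===== SOURCE A (Python) =====
-- def a_equal(data_summary):
--
--     results = dict()
--     for data_each in data_summary.values():
--         for k, v in data_each.items():
--             try:
--                 results[k] += v
--             except KeyError:
--                 results[k] = v
--     return(results)
-- ===== SOURCE B (Python) =====
-- def a_equal(data_summary):
--     # Two-pass re-implementation: first group every value under its key
--     # (keys in first-appearance order), then reduce each group seeded with
--     # its first value (never with 0).
--     groups = {}
--     for d in data_summary.values():
--         for k, v in d.items():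
--             groups.setdefault(k, []).append(v)
--     results = {}
--     for k, vals in groups.items():
--         acc = vals[0]
--         for v in vals[1:]:
--             acc = acc + v
--         results[k] = acc
--     return results
-- ===== Notes on version B (the rewrite author's own statement) =====
-- stated objective: alternative
-- what changed: A streams all inner dicts once, accumulating sums into the result dict on the fly; B makes two passes: it first groups every value into a per-key list (keys indexed in first-appearance order), then reduces each group starting from its first value.
import Mathlib
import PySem

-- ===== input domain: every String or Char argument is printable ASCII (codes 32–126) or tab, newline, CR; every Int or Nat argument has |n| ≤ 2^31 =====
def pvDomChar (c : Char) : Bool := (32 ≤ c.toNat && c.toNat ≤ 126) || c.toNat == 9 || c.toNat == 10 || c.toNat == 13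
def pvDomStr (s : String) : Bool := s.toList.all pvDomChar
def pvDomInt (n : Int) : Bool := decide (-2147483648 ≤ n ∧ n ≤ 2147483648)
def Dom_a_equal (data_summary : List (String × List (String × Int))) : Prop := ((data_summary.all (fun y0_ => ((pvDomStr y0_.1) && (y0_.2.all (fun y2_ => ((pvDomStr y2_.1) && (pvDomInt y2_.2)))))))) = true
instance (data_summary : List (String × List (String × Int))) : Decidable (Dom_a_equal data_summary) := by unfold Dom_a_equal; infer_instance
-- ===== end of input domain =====

-- ===== PORT A =====
-- one honest line: B replaces A's streaming accumulate-by-key with a two-pass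
-- group-values-per-key-then-reduce of the same cost (objective: alternative); return value only.
-- dict-of-dicts arguments are modelled as association lists; both ports read them
-- through the same PySem.Dict.ofList conversion (Python dict construction).
def a_equal (data_summary : List (String × List (String × Int))) : List (String × Int) :=
  let results :=
    ((PySem.Dict.ofList data_summary : PySem.Dict String (List (String × Int))).values).foldl
      (fun r data_each =>
        ((PySem.Dict.ofList data_each : PySem.Dict String Int).items).foldl
          (fun r p =>
            if r.contains p.1 then r.modify p.1 0 (· + p.2) else r.insert p.1 p.2) r)
      PySem.Dict.empty
  results.items

-- ===== PORT B =====
def a_equal_alt (data_summary : List (String × List (String × Int))) : List (String × Int) :=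
  let groups : PySem.Dict String (List Int) :=
    ((PySem.Dict.ofList data_summary : PySem.Dict String (List (String × Int))).values).foldl
      (fun g d =>
        ((PySem.Dict.ofList d : PySem.Dict String Int).items).foldl
          (fun g p => g.modify p.1 [] (· ++ [p.2])) g)
      PySem.Dict.empty
  groups.items.map (fun kv =>
    match kv.2 with
    | [] => (kv.1, 0)
    | v :: rest => (kv.1, rest.foldl (· + ·) v))

-- ===== PRECONDITION & SPEC =====
def Spec_a_equal (data_summary : List (String × List (String × Int))) (out : List (String × Int)) : Prop := out = a_equal_alt data_summary
instance (data_summary : List (String × List (String × Int))) (out : List (String × Int)) : Decidable (Spec_a_equal data_summary out) := by unfold Spec_a_equal; infer_instance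

-- ===== CLAIM (what is proved, stated in full; the proofs are below) =====
def Claim_equal_a_equal : Prop := ∀ (data_summary : List (String × List (String × Int))), Dom_a_equal data_summary → Spec_a_equal data_summary (a_equal data_summary)

-- ===== LEMMAS AND PROOFS =====

-- pvIns: A's loop body, with try/except and Dict.modify rewritten as one insert
def pvIns (r : PySem.Dict String Int) (p : String × Int) : PySem.Dict String Int :=
  r.insert p.1 (r.getD p.1 0 + p.2)

lemma body_eq_pvIns :
    (fun (r : PySem.Dict String Int) (p : String × Int) =>
      if r.contains p.1 then r.modify p.1 0 (· + p.2) else r.insert p.1 p.2) = pvIns := by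
  funext r p
  by_cases h : r.contains p.1
  · simp [h, pvIns, PySem.Dict.modify, PySem.Dict.getD_eq_get?_getD]
  · have h0 : r.getD p.1 0 = 0 := PySem.Dict.getD_of_not_contains r 0 (by simpa using h)
    simp [h, pvIns, h0]

lemma getD_foldl_pvIns (ps : List (String × Int)) (d : PySem.Dict String Int) (k : String) :
    (ps.foldl pvIns d).getD k 0
      = d.getD k 0 + ((ps.filter (fun p => p.1 == k)).map (·.2)).sum := by
  induction ps generalizing d with
  | nil => simp
  | cons p ps ih =>
    simp only [List.foldl_cons, ih, pvIns, List.filter_cons]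
    by_cases hk : p.1 = k
    · simp [hk]
      ring
    · simp [hk, PySem.Dict.getD_insert, Ne.symm hk]

-- a double loop over inner dicts is one loop over the concatenated items, for any step
lemma double_fold_flatten {σ : Type} (f : σ → String × Int → σ)
    (L : List (PySem.Dict String Int)) (s : σ) :
    L.foldl (fun r dd => dd.items.foldl f r) s
      = (L.flatMap PySem.Dict.items).foldl f s := by
  induction L generalizing s with
  | nil => rfl
  | cons dd L ih => simp [List.flatMap_cons, List.foldl_append, ih]

lemma foldl_add_head (v : Int) (rest : List Int) : rest.foldl (· + ·) v = (v :: rest).sum := by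
  simp [List.sum_eq_foldl]

lemma main_eq (vs : List (List (String × Int))) :
    (vs.foldl
      (fun r data_each =>
        ((PySem.Dict.ofList data_each : PySem.Dict String Int).items).foldl pvIns r)
      PySem.Dict.empty).items
    = (vs.foldl
        (fun (g : PySem.Dict String (List Int)) d =>
          ((PySem.Dict.ofList d : PySem.Dict String Int).items).foldl
            (fun g p => g.modify p.1 [] (· ++ [p.2])) g)
        PySem.Dict.empty).items.map (fun kv =>
          match kv.2 with
          | [] => (kv.1, 0)
          | v :: rest => (kv.1, rest.foldl (· + ·) v)) := by
  set allp := ((vs.map PySem.Dict.ofList : List (PySem.Dict String Int)).flatMap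
    PySem.Dict.items) with hallp
  have hA : vs.foldl
      (fun r data_each =>
        ((PySem.Dict.ofList data_each : PySem.Dict String Int).items).foldl pvIns r)
      PySem.Dict.empty = allp.foldl pvIns PySem.Dict.empty := by
    rw [← double_fold_flatten, List.foldl_map]
  have hB : vs.foldl
      (fun (g : PySem.Dict String (List Int)) d =>
        ((PySem.Dict.ofList d : PySem.Dict String Int).items).foldl
          (fun g p => g.modify p.1 [] (· ++ [p.2])) g)
      PySem.Dict.empty
      = allp.foldl (fun (g : PySem.Dict String (List Int)) p =>
          g.modify p.1 [] (· ++ [p.2])) PySem.Dict.empty := by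
    rw [← double_fold_flatten, List.foldl_map]
  rw [hA, hB]
  set R := allp.foldl pvIns PySem.Dict.empty with hR
  set G := allp.foldl (fun (g : PySem.Dict String (List Int)) p =>
    g.modify p.1 [] (· ++ [p.2])) PySem.Dict.empty with hG
  have hndR : R.keys.Nodup :=
    PySem.Dict.nodup_keys_foldl_insert_key allp (·.1) _ _ (by simp)
  have hndG : G.keys.Nodup :=
    PySem.Dict.nodup_keys_foldl_modify_key allp (·.1) [] _ _ (by simp)
  have hkR : R.keys = PySem.Set.ofList (allp.map (·.1)) :=
    PySem.Dict.keys_foldl_insert_key allp (·.1)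
      (fun d p => d.getD p.1 0 + p.2) PySem.Dict.empty
  have hkG : G.keys = PySem.Set.ofList (allp.map (·.1)) :=
    PySem.Dict.keys_foldl_modify_key allp (·.1) []
      (fun (_ : PySem.Dict String (List Int)) (p : String × Int) => (· ++ [p.2])) PySem.Dict.empty
  rw [PySem.Dict.items_eq_map_keys R hndR 0, PySem.Dict.items_eq_map_keys G hndG [],
    List.map_map, hkR, hkG]
  apply List.map_congr_left
  intro k hk
  have hk' : k ∈ allp.map (·.1) := (PySem.Set.mem_ofList _ _).1 hk
  have hGk : G.getD k [] = (allp.filter (fun p => p.1 == k)).map (·.2) := by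
    rw [hG, PySem.Dict.getD_foldl_modify_append]
    simp
  have hRk : R.getD k 0 = ((allp.filter (fun p => p.1 == k)).map (·.2)).sum := by
    rw [hR, getD_foldl_pvIns]
    simp
  have hvne : (allp.filter (fun p => p.1 == k)).map (·.2) ≠ [] := by
    rcases List.mem_map.1 hk' with ⟨p, hp, rfl⟩
    simp only [ne_eq, List.map_eq_nil_iff, List.filter_eq_nil_iff, not_forall]
    exact ⟨p, hp, by simp⟩
  simp only [Function.comp]
  cases hv : (allp.filter (fun p => p.1 == k)).map (·.2) with
  | nil => exact absurd hv hvne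
  | cons v rest =>
    simp only [hGk, hv, foldl_add_head, hRk]

-- ===== VERDICT (by name: the statement is the Claim_ definition above) =====
theorem a_equal_spec : Claim_equal_a_equal := by
  intro ds _
  show a_equal ds = a_equal_alt ds
  unfold a_equal a_equal_alt
  rw [body_eq_pvIns]
  exact main_eq _
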